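-- pv_equiv track=rewrite | github.com/Laharnar/CurvespaceLang | curvespace/standard-tools/curvespace.py | columnSegments
-- ===== SOURCE A (Python) =====
-- def columnSegments(message, columns=20):
--     split = message.split("\n")
--     chunks = list()
--     for offsets in range(0, len(split[0]), columns):
--         chunk = list()
--         for j in split:
--             idx = j.index(":")
--             piece = j[0:idx + 1] + j[idx + 1 + offsets:idx + columns + offsets]
--             chunk.append(piece)
--         chunks.append("\n".join(chunk))
--     return chunks
-- ===== SOURCE B (Python) =====
-- def columnSegments(message, columns=20):
--     lines = message.split("\n")
--     n = len(range(0, len(lines[0]), columns))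
--     if n == 0:
--         return []
--     rows = []
--     for j in lines:
--         idx = j.index(":")
--         label = j[0:idx + 1]
--         rows.append([label + j[idx + 1 + off:idx + columns + off]
--                      for off in range(0, n * columns, columns)])
--     return ["\n".join(row[k] for row in rows) for k in range(n)]
-- ===== Notes on version B (the rewrite author's own statement) =====
-- stated objective: alternative
-- what changed: A loops over windows outermost and rescans every line (recomputing each line's colon index) per window; B makes one pass over the lines, computing each line's colon index and label once and building a per-line piece matrix, then transposes it into the window chunks.
import Mathlib
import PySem

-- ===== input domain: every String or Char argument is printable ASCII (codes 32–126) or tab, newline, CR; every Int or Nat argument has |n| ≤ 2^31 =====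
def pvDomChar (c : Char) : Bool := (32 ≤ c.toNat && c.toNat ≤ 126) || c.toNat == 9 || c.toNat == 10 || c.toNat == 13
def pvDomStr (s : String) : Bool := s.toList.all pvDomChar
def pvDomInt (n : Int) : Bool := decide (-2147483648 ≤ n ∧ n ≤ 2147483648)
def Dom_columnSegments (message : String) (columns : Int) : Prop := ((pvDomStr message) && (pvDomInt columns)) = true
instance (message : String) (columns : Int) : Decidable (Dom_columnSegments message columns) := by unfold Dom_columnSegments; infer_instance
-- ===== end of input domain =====

-- B builds a per-line piece matrix in one pass over the lines (colon index and label computed once per line) and then transposes it into the window chunks; objective: alternative decomposition (lines outer / windows inner instead of A's windows outer / lines inner).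

-- ===== PORT A =====
def columnSegments (message : String) (columns : Int) : List String :=
  let split := PySem.Chars.splitOn message.toList ['\n']
  (PySem.List.pyRange 0 (PySem.Chars.len (PySem.List.pyGetD split 0 [])) columns).foldl
    (fun chunks offsets =>
      chunks ++ [String.ofList (PySem.Chars.join ['\n']
        (split.foldl (fun chunk j =>
          let idx := PySem.Chars.find j [':']
          let piece := PySem.Chars.slice j (some 0) (some (idx + 1)) ++
                       PySem.Chars.slice j (some (idx + 1 + offsets)) (some (idx + columns + offsets))
          chunk ++ [piece]) []))]) []

-- ===== PORT B =====
def columnSegments_alt (message : String) (columns : Int) : List String :=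
  let lines := PySem.Chars.splitOn message.toList ['\n']
  let n := (PySem.List.pyRange 0 (PySem.Chars.len (PySem.List.pyGetD lines 0 [])) columns).length
  if n = 0 then []
  else
    let rows := lines.map (fun j =>
      let idx := PySem.Chars.find j [':']
      let label := PySem.Chars.slice j (some 0) (some (idx + 1))
      (PySem.List.pyRange 0 ((n : Int) * columns) columns).map (fun off =>
        label ++ PySem.Chars.slice j (some (idx + 1 + off)) (some (idx + columns + off))))
    (PySem.List.pyRange 0 ((n : Int)) 1).map (fun k =>
      String.ofList (PySem.Chars.join ['\n'] (rows.map (fun row => PySem.List.pyGetD row k []))))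

-- ===== PRECONDITION & SPEC =====
-- Pre_ excludes exactly the inputs where the Python raises: columns = 0 (range() ValueError) and,
-- when the window loop is non-empty (columns > 0 and a non-empty first line), a line lacking a colon separator (str.index ValueError).
def Pre_columnSegments (message : String) (columns : Int) : Prop :=
  columns ≠ 0 ∧
  ((0 < columns ∧ PySem.List.pyGetD (PySem.Chars.splitOn message.toList ['\n']) 0 [] ≠ []) →
    ∀ j ∈ PySem.Chars.splitOn message.toList ['\n'], PySem.Chars.isIn [':'] j = true)
instance (message : String) (columns : Int) : Decidable (Pre_columnSegments message columns) := by unfold Pre_columnSegments; infer_instance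
def pvWitness_columnSegments : String × Int := ("ab:cdef\ncd:ghi", 2)
def Spec_columnSegments (message : String) (columns : Int) (out : List String) : Prop := out = columnSegments_alt message columns
instance (message : String) (columns : Int) (out : List String) : Decidable (Spec_columnSegments message columns out) := by unfold Spec_columnSegments; infer_instance

-- ===== CLAIM (what is proved, stated in full; the proofs are below) =====
def Claim_equal_columnSegments : Prop := ∀ (message : String) (columns : Int), Dom_columnSegments message columns → Pre_columnSegments message columns → Spec_columnSegments message columns (columnSegments message columns)

-- ===== LEMMAS AND PROOFS =====

-- A's two nested append-loops are the nested maps over the same ranges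
theorem pv_columnSegments_eq_map (message : String) (columns : Int) :
    columnSegments message columns =
      (PySem.List.pyRange 0 (PySem.Chars.len (PySem.List.pyGetD (PySem.Chars.splitOn message.toList ['\n']) 0 [])) columns).map
        (fun off => String.ofList (PySem.Chars.join ['\n']
          ((PySem.Chars.splitOn message.toList ['\n']).map (fun j =>
            PySem.Chars.slice j (some 0) (some (PySem.Chars.find j [':'] + 1)) ++
            PySem.Chars.slice j (some (PySem.Chars.find j [':'] + 1 + off))
              (some (PySem.Chars.find j [':'] + columns + off)))))) := by
  unfold columnSegments
  dsimp only
  simp only [PySem.List.foldl_append_singleton_eq_map, List.nil_append]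

-- a positive-step range whose stop is (its own length) * step is the range itself
theorem pv_pyRange_len_mul (b c : Int) (hc : 0 < c) :
    PySem.List.pyRange 0 (((PySem.List.pyRange 0 b c).length : Int) * c) c = PySem.List.pyRange 0 b c := by
  rw [PySem.List.pyRange_of_pos 0 b hc, PySem.List.pyRange_of_pos 0 _ hc]
  rcases Decidable.em (0 < b) with h | h
  · simp only [if_pos h, List.length_map, List.length_range]
    set N : Nat := ((b - 0 + c - 1) / c).toNat with hN
    have hNpos : 0 < N := by
      rw [hN]
      have h1 : 1 ≤ (b - 0 + c - 1) / c := (Int.le_ediv_iff_mul_le hc).mpr (by omega)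
      omega
    have hstop : (0 : Int) < (N : Int) * c := by positivity
    rw [if_pos hstop]
    congr 1
    have : ((N : Int) * c - 0 + c - 1) / c = N := by
      rw [show (N : Int) * c - 0 + c - 1 = (c - 1) + N * c by ring,
        Int.add_mul_ediv_right _ _ (by omega : c ≠ 0),
        Int.ediv_eq_zero_of_lt (by omega) (by omega)]
      ring
    rw [this]
    simp
  · simp only [if_neg h, List.length_map, List.length_range]
    norm_num

theorem pv_pyRange_neg_nil (b c : Int) (hc : c < 0) (_hb : 0 ≤ b) :
    PySem.List.pyRange 0 b c = [] := by
  rw [PySem.List.pyRange_of_neg 0 b hc, if_neg (by omega)]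
  simp

-- the transpose step, abstract in the per-line piece function f and the chunk finisher S
theorem pv_transpose {α β : Type} (lines : List α) (f : α → Int → β) (S : List β → String)
    (dflt : β) (b c : Int) (hc : 0 < c) (hb : 0 ≤ b) :
    (PySem.List.pyRange 0 (((PySem.List.pyRange 0 b c).length : Int)) 1).map (fun k =>
      S ((lines.map (fun j =>
        (PySem.List.pyRange 0 (((PySem.List.pyRange 0 b c).length : Int) * c) c).map (fun off => f j off))).map
          (fun row => PySem.List.pyGetD row k dflt)))
    = (PySem.List.pyRange 0 b c).map (fun off => S (lines.map (fun j => f j off))) := by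
  rw [pv_pyRange_len_mul b c hc]
  have hoffs : PySem.List.pyRange 0 b c =
      (List.range (PySem.List.pyRange 0 b c).length).map (fun k : Nat => 0 + c * (k : Int)) := by
    conv_lhs => rw [PySem.List.pyRange_of_pos 0 b hc]
    rw [PySem.List.pyRange_of_pos 0 b hc]
    simp [List.length_map, List.length_range]
  rw [PySem.List.pyRange_zero_nat, List.map_map]
  conv_rhs => rw [hoffs, List.map_map]
  refine List.map_congr_left (fun k hk => ?_)
  have hkn : k < (PySem.List.pyRange 0 b c).length := List.mem_range.mp hk
  simp only [Function.comp]
  congr 1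
  rw [List.map_map]
  refine List.map_congr_left (fun j _ => ?_)
  simp only [Function.comp]
  rw [PySem.List.pyGetD_eq_getElem _ dflt (by positivity)
    (by simpa using hkn)]
  simp only [Int.toNat_natCast, List.getElem_map]
  congr 1
  rw [List.getElem_of_eq hoffs, List.getElem_map, List.getElem_range]

theorem columnSegments_spec_aux (message : String) (columns : Int)
    (hc : columns ≠ 0) :
    columnSegments message columns = columnSegments_alt message columns := by
  rw [pv_columnSegments_eq_map]
  unfold columnSegments_alt
  dsimp only
  by_cases h0 : (PySem.List.pyRange 0 (PySem.Chars.len (PySem.List.pyGetD (PySem.Chars.splitOn message.toList ['\n']) 0 [])) columns).length = 0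
  · rw [if_pos h0, List.length_eq_zero_iff.mp h0, List.map_nil]
  · rw [if_neg h0]
    have hb : 0 ≤ PySem.Chars.len (PySem.List.pyGetD (PySem.Chars.splitOn message.toList ['\n']) 0 []) := by
      rw [PySem.Chars.len_eq]; positivity
    have hcpos : 0 < columns := by
      rcases lt_or_gt_of_ne hc with hneg | hpos
      · exact absurd (by rw [pv_pyRange_neg_nil _ columns hneg hb]; rfl) h0
      · exact hpos
    exact (pv_transpose (PySem.Chars.splitOn message.toList ['\n'])
      (fun j off =>
        PySem.Chars.slice j (some 0) (some (PySem.Chars.find j [':'] + 1)) ++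
        PySem.Chars.slice j (some (PySem.Chars.find j [':'] + 1 + off))
          (some (PySem.Chars.find j [':'] + columns + off)))
      (fun l => String.ofList (PySem.Chars.join ['\n'] l)) []
      (PySem.Chars.len (PySem.List.pyGetD (PySem.Chars.splitOn message.toList ['\n']) 0 []))
      columns hcpos hb).symm

-- ===== VERDICT (by name: the statement is the Claim_ definition above) =====
theorem columnSegments_spec : Claim_equal_columnSegments := by
  intro message columns _ hpre
  unfold Spec_columnSegments
  exact columnSegments_spec_aux message columns hpre.1
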